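-- pv_equiv track=rewrite | github.com/opencomputeproject/SAI-Challenger | common/sai.py | __bulk_attr_serialize
-- ===== SOURCE A (Python) =====
-- def __bulk_attr_serialize(attr):
--     data = ""
--     # Input attributes: [a, v, a, v, ...]
--     # Serialized attributes format: "a=v|a=v|..."
--     for i, v in enumerate(attr):
--         if i % 2 == 0:
--             if len(data) > 0:
--                 data += "|"
--             data += v + "="
--         else:
--             data += v
--     return data
-- ===== SOURCE B (Python) =====
-- def __bulk_attr_serialize(attr):
--     parts = []
--     for i in range(0, len(attr), 2):
--         if i + 1 < len(attr):
--             parts.append(attr[i] + "=" + attr[i + 1])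
--         else:
--             parts.append(attr[i] + "=")
--     return "|".join(parts)
-- ===== Notes on version B (the rewrite author's own statement) =====
-- stated objective: simpler
-- what changed: Replaces the enumerate/parity-branch running-string accumulator with a step-2 pairwise scan that builds a parts list and emits it with a single '|'.join.
import Mathlib
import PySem

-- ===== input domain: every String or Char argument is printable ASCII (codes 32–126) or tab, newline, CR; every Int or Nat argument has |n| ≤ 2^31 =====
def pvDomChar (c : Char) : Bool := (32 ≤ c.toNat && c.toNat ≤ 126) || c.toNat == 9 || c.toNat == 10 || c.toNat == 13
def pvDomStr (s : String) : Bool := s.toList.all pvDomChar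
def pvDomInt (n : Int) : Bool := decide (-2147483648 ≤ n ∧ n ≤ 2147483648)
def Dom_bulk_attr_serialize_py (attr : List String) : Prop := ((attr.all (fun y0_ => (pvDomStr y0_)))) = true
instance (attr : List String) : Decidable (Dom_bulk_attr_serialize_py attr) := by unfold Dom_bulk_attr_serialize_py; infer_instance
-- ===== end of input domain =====

-- B replaces A's enumerate/parity-branch running-string accumulator with a step-2 pairwise
-- scan that collects "k=v" parts and emits them with a single "|".join (objective: simpler).

-- ===== PORT A =====
def bulk_attr_serialize_py (attr : List String) : String :=
  (PySem.List.enumerate attr 0).foldl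
    (fun data iv =>
      if PySem.Int.mod iv.1 2 = 0 then
        (if PySem.Str.len data > 0 then data ++ "|" else data) ++ (iv.2 ++ "=")
      else
        data ++ iv.2)
    ""

-- ===== PORT B =====
-- attr[i] / attr[i+1] are ported with pyGetD: every index produced by range(0, len(attr), 2)
-- (and i+1 under the guard i+1 < len(attr)) is provably in range, so the default is never used.
def bulk_attr_serialize_py_alt (attr : List String) : String :=
  let parts := (PySem.List.pyRange 0 (PySem.List.len attr) 2).foldl
    (fun parts i =>
      if i + 1 < PySem.List.len attr then
        parts ++ [PySem.List.pyGetD attr i "" ++ "=" ++ PySem.List.pyGetD attr (i + 1) ""]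
      else
        parts ++ [PySem.List.pyGetD attr i "" ++ "="])
    []
  PySem.Str.join "|" parts

-- ===== PRECONDITION & SPEC =====
def Spec_bulk_attr_serialize_py (attr : List String) (out : String) : Prop := out = bulk_attr_serialize_py_alt attr
instance (attr : List String) (out : String) : Decidable (Spec_bulk_attr_serialize_py attr out) := by unfold Spec_bulk_attr_serialize_py; infer_instance

-- ===== CLAIM (what is proved, stated in full; the proofs are below) =====
def Claim_equal_bulk_attr_serialize_py : Prop := ∀ (attr : List String), Dom_bulk_attr_serialize_py attr → Spec_bulk_attr_serialize_py attr (bulk_attr_serialize_py attr)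

-- ===== LEMMAS AND PROOFS =====

-- the list of "k=v" / trailing "k=" parts both programs serialize, two elements at a time
def pvParts : List String → List String
  | [] => []
  | [k] => [k ++ "="]
  | k :: v :: rest => (k ++ "=" ++ v) :: pvParts rest

theorem pv_mod_two (s : Int) : PySem.Int.mod s 2 = s % 2 := by
  simp [PySem.Int.mod, Int.fmod_eq_emod]

theorem pv_len_pos {data : String} (h : data ≠ "") : PySem.Str.len data > 0 := by
  have h' : data.toList ≠ [] := by
    simpa [String.toList_eq_nil_iff] using h
  simp only [PySem.Str.len]
  exact_mod_cast List.length_pos_iff.mpr h'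

theorem pv_append_ne_empty {a : String} (b : String) (h : a ≠ "") : a ++ b ≠ "" := by
  intro hc
  have this1 := congrArg String.toList hc
  rw [String.toList_append, show ("" : String).toList = [] from rfl] at this1
  exact h (String.toList_eq_nil_iff.mp (List.append_eq_nil_iff.mp this1).1)

theorem pv_eq_ne_empty (k : String) : k ++ "=" ≠ "" := by
  intro hc
  have this1 := congrArg String.toList hc
  rw [String.toList_append, show ("=" : String).toList = ['='] from rfl,
      show ("" : String).toList = [] from rfl] at this1
  simp at this1

-- join "|" (p :: parts) as a left fold starting from the first part
theorem pv_join_foldl (sep : String) (parts : List String) :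
    ∀ (p : String), parts.foldl (fun d q => d ++ sep ++ q) p = PySem.Str.join sep (p :: parts) := by
  induction parts with
  | nil =>
      intro p
      rw [← String.toList_inj]
      simp [PySem.Str.toList_join, PySem.Chars.join_singleton]
  | cons q rest ih =>
      intro p
      rw [List.foldl_cons, ih (p ++ sep ++ q), ← String.toList_inj]
      cases rest with
      | nil =>
          simp [PySem.Str.toList_join, PySem.Chars.join_singleton, PySem.Chars.join_cons_cons,
            String.toList_append, List.append_assoc]
      | cons r rs =>
          simp [PySem.Str.toList_join, PySem.Chars.join_cons_cons, String.toList_append,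
            List.append_assoc]

-- A's enumerate fold, started at an even index with a nonempty accumulator,
-- appends "|" ++ part for each pair of the remaining list
theorem pv_A_fold (attr : List String) :
    ∀ (s : Int) (data : String), s % 2 = 0 → data ≠ "" →
      (PySem.List.enumerate attr s).foldl
        (fun data iv =>
          if PySem.Int.mod iv.1 2 = 0 then
            (if PySem.Str.len data > 0 then data ++ "|" else data) ++ (iv.2 ++ "=")
          else
            data ++ iv.2)
        data
      = (pvParts attr).foldl (fun d q => d ++ "|" ++ q) data := by
  induction attr using pvParts.induct with
  | case1 =>
      intro s data _ _
      simp [PySem.List.enumerate_nil, pvParts]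
  | case2 k =>
      intro s data hs hd
      simp only [PySem.List.enumerate_cons, PySem.List.enumerate_nil, List.foldl_cons,
        List.foldl_nil, pvParts]
      rw [if_pos (show PySem.Int.mod s 2 = 0 by rw [pv_mod_two]; exact hs),
          if_pos (pv_len_pos hd)]
  | case3 k v rest ih =>
      intro s data hs hd
      simp only [PySem.List.enumerate_cons, List.foldl_cons]
      rw [if_pos (show PySem.Int.mod s 2 = 0 by rw [pv_mod_two]; exact hs),
          if_pos (pv_len_pos hd),
          if_neg (show ¬ PySem.Int.mod (s + 1) 2 = 0 by rw [pv_mod_two]; omega)]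
      rw [ih (s + 1 + 1) _ (by omega)
        (pv_append_ne_empty v (pv_append_ne_empty (k ++ "=") (pv_append_ne_empty "|" hd)))]
      simp only [pvParts, List.foldl_cons]
      rw [String.append_assoc (s₁ := data ++ "|") (s₂ := k ++ "=") (s₃ := v)]

-- A equals the join of the pair parts
theorem pv_A_eq_join (attr : List String) :
    bulk_attr_serialize_py attr = PySem.Str.join "|" (pvParts attr) := by
  unfold bulk_attr_serialize_py
  match attr with
  | [] =>
      rw [← String.toList_inj]
      simp [PySem.List.enumerate_nil, pvParts, PySem.Str.toList_join, PySem.Chars.join_nil]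
  | [k] =>
      simp only [PySem.List.enumerate_cons, PySem.List.enumerate_nil, List.foldl_cons,
        List.foldl_nil]
      rw [if_pos (show PySem.Int.mod 0 2 = 0 by decide),
          if_neg (show ¬ PySem.Str.len "" > 0 by decide), String.empty_append]
      rw [← String.toList_inj]
      simp [pvParts, PySem.Str.toList_join, PySem.Chars.join_singleton]
  | k :: v :: rest =>
      simp only [PySem.List.enumerate_cons, List.foldl_cons]
      rw [if_pos (show PySem.Int.mod 0 2 = 0 by decide),
          if_neg (show ¬ PySem.Str.len "" > 0 by decide), String.empty_append]
      rw [if_neg (show ¬ PySem.Int.mod (0 + 1) 2 = 0 by decide)]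
      rw [pv_A_fold rest (0 + 1 + 1) _ (by norm_num)
        (pv_append_ne_empty v (pv_eq_ne_empty k))]
      rw [pv_join_foldl "|" (pvParts rest) ((k ++ "=") ++ v)]
      simp [pvParts, String.append_assoc]

theorem pv_pyRange_two_nil {a b : Int} (h : b ≤ a) : PySem.List.pyRange a b 2 = [] := by
  rw [PySem.List.pyRange_of_pos a b (by norm_num)]
  rw [if_neg (by omega)]
  simp

theorem pv_pyRange_two_cons {a b : Int} (h : a < b) :
    PySem.List.pyRange a b 2 = a :: PySem.List.pyRange (a + 2) b 2 := by
  rw [PySem.List.pyRange_of_pos a b (by norm_num),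
      PySem.List.pyRange_of_pos (a + 2) b (by norm_num)]
  by_cases h2 : a + 2 < b
  · rw [if_pos h, if_pos h2]
    rw [show ((b - a + 2 - 1) / 2).toNat = ((b - (a + 2) + 2 - 1) / 2).toNat + 1 by omega]
    rw [List.range_succ_eq_map, List.map_cons, List.map_map]
    refine congrArg₂ _ (by ring) ?_
    refine List.map_congr_left ?_
    intro x _
    simp only [Function.comp_apply, Nat.succ_eq_add_one]
    push_cast
    ring
  · rw [if_pos h, if_neg h2]
    rw [show ((b - a + 2 - 1) / 2).toNat = 1 by omega]
    simp

-- B's step-2 range fold appends exactly the pair parts of the remaining suffix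
theorem pv_B_fold (attr : List String) :
    ∀ (fuel m : Nat) (acc : List String), attr.length ≤ 2 * m + fuel →
      (PySem.List.pyRange (2 * (m : Int)) ((attr.length : Int)) 2).foldl
        (fun parts i =>
          if i + 1 < ((attr.length : Int)) then
            parts ++ [PySem.List.pyGetD attr i "" ++ "=" ++ PySem.List.pyGetD attr (i + 1) ""]
          else
            parts ++ [PySem.List.pyGetD attr i "" ++ "="])
        acc
      = acc ++ pvParts (attr.drop (2 * m)) := by
  intro fuel
  induction fuel with
  | zero =>
      intro m acc hle
      rw [pv_pyRange_two_nil (by exact_mod_cast hle)]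
      rw [List.drop_eq_nil_of_le (by omega)]
      simp [pvParts]
  | succ fuel ih =>
      intro m acc hle
      by_cases hm : attr.length ≤ 2 * m
      · rw [pv_pyRange_two_nil (by exact_mod_cast hm)]
        rw [List.drop_eq_nil_of_le (by omega)]
        simp [pvParts]
      · have hm' : 2 * m < attr.length := by omega
        rw [pv_pyRange_two_cons (by exact_mod_cast hm')]
        rw [List.foldl_cons]
        rw [show (2 * (m : Int) + 2) = 2 * ((m + 1 : Nat) : Int) by push_cast; ring]
        rw [ih (m + 1) _ (by omega)]
        by_cases hp : 2 * m + 1 < attr.length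
        · rw [if_pos (by exact_mod_cast hp)]
          rw [show (2 * (m : Int)) = ((2 * m : Nat) : Int) by push_cast; ring]
          rw [show ((2 * m : Nat) : Int) + 1 = ((2 * m + 1 : Nat) : Int) by push_cast; ring]
          rw [PySem.List.pyGetD_natCast, PySem.List.pyGetD_natCast]
          rw [List.getD_eq_getElem _ _ hm', List.getD_eq_getElem _ _ hp]
          rw [List.drop_eq_getElem_cons hm', List.drop_eq_getElem_cons hp]
          rw [show 2 * m + 1 + 1 = 2 * (m + 1) by omega]
          simp [pvParts]
        · rw [if_neg (by exact_mod_cast hp)]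
          rw [show (2 * (m : Int)) = ((2 * m : Nat) : Int) by push_cast; ring]
          rw [PySem.List.pyGetD_natCast]
          rw [List.getD_eq_getElem _ _ hm']
          rw [List.drop_eq_getElem_cons hm']
          rw [List.drop_eq_nil_of_le (by omega : attr.length ≤ 2 * m + 1)]
          rw [List.drop_eq_nil_of_le (by omega : attr.length ≤ 2 * (m + 1))]
          simp [pvParts]

-- B equals the join of the pair parts
theorem pv_B_eq_join (attr : List String) :
    bulk_attr_serialize_py_alt attr = PySem.Str.join "|" (pvParts attr) := by
  simp only [bulk_attr_serialize_py_alt]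
  rw [show PySem.List.len attr = ((attr.length : Int)) from rfl]
  rw [show (0 : Int) = 2 * ((0 : Nat) : Int) by norm_num]
  rw [pv_B_fold attr attr.length 0 [] (by omega)]
  simp

-- ===== VERDICT (by name: the statement is the Claim_ definition above) =====
theorem bulk_attr_serialize_py_spec : Claim_equal_bulk_attr_serialize_py := by
  intro attr _
  unfold Spec_bulk_attr_serialize_py
  rw [pv_A_eq_join attr, pv_B_eq_join attr]
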